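-- pv_equiv track=rewrite | github.com/simon-pfahler/qcd_ml | src/qcd_ml/nn/pt_pool/get_paths.py | get_paths_lexicographic
-- ===== SOURCE A (Python) =====
-- import itertools
--
-- def get_paths_lexicographic(block_size, _gpt_compat=False):
--     """
--     For a reference point (1,1,1,1) and a point (x_1 + 1, x_2 + 1, x_3 + 1, x_4 + 1) the path
--     is generated as such:
--     .. math::
--
--         H_{-4}^{x_4} H_{-3}^{x_3} H_{-2}^{x_2} H_{-1}^{x_1}
--
--     i.e., the dimension 1 is traversed first.
--
--     """
--     paths = []
--     for position in itertools.product(*(range(bs) for bs in block_size)):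
--         path = sum([[(mu, -1)] for mu, n in enumerate(position) for _ in range(n)], start=[])
--         paths.append(path)
--     if _gpt_compat is False:
--         return paths
--     else:
--         return [list(reversed(pth)) for pth in paths]
-- ===== SOURCE B (Python) =====
-- def _decode(i, sizes):
--     """Decode linear index i into a mixed-radix position over sizes (last axis fastest)."""
--     if not sizes:
--         return []
--     t = 1
--     for s in sizes[1:]:
--         t *= s
--     q, r = divmod(i, t)
--     return [q] + _decode(r, sizes[1:])
--
--
-- def get_paths_lexicographic(block_size, _gpt_compat=False):
--     sizes = [bs if bs > 0 else 0 for bs in block_size]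
--     total = 1
--     for s in sizes:
--         total *= s
--     paths = []
--     for i in range(total):
--         path = []
--         for mu, n in enumerate(_decode(i, sizes)):
--             path += [(mu, -1)] * n
--         if _gpt_compat:
--             path.reverse()
--         paths.append(path)
--     return paths
-- ===== Notes on version B (the rewrite author's own statement) =====
-- stated objective: alternative
-- what changed: Replaces the itertools.product traversal with a mixed-radix odometer: a single linear index over range(total) is decoded by repeated divmod into each position, and the path is built by extending with replicated (mu,-1) hops (in-place reverse for _gpt_compat).
import Mathlib
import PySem

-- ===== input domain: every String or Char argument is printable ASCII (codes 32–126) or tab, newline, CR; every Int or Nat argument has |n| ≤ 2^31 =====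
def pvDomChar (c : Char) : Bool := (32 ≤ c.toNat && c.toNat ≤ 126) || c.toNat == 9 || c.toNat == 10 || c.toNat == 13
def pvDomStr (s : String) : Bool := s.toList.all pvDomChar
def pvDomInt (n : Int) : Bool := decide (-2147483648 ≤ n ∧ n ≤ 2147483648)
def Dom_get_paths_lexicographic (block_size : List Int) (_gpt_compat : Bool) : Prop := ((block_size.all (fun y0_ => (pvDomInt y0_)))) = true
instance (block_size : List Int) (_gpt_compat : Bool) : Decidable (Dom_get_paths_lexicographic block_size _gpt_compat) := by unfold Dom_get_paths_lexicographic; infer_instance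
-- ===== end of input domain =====

-- B replaces the itertools.product traversal by a mixed-radix decode of a single
-- linear index (a different decomposition of the same enumeration; no speed claim).

-- ===== PORT A =====
-- itertools.product(*iterables): first axis varies slowest
def pvProdA : List (List Int) → List (List Int)
  | [] => [[]]
  | l :: ls => l.flatMap (fun x => (pvProdA ls).map (fun p => x :: p))

-- path = sum([[(mu,-1)] for mu, n in enumerate(position) for _ in range(n)], start=[])
def pvPathA (position : List Int) : List (Int × Int) :=
  ((PySem.List.enumerate position).flatMap
      (fun p => (PySem.List.pyRange 0 p.2 1).map (fun _ => [(p.1, (-1 : Int))]))).foldl (· ++ ·) []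

def get_paths_lexicographic (block_size : List Int) (_gpt_compat : Bool) : List (List (Int × Int)) :=
  let paths := (pvProdA (block_size.map (fun bs => PySem.List.pyRange 0 bs 1))).map pvPathA
  if _gpt_compat = false then paths else paths.map (fun pth => pth.reverse)

-- ===== PORT B =====
-- product of a list of ints, as Source B's accumulator loop
def pvProdInt (l : List Int) : Int := l.foldl (· * ·) 1

-- _decode(i, sizes): mixed-radix digits, last axis least significant
def pvDecode (i : Int) : List Int → List Int
  | [] => []
  | _ :: rest =>
      let t := pvProdInt rest
      PySem.Int.floordiv i t :: pvDecode (PySem.Int.mod i t) rest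

def get_paths_lexicographic_alt (block_size : List Int) (_gpt_compat : Bool) : List (List (Int × Int)) :=
  let sizes := block_size.map (fun bs => if bs > 0 then bs else 0)
  let total := pvProdInt sizes
  (PySem.List.pyRange 0 total 1).map (fun i =>
    let path := (PySem.List.enumerate (pvDecode i sizes)).flatMap
        (fun p => List.replicate p.2.toNat (p.1, (-1 : Int)))
    if _gpt_compat then path.reverse else path)

-- ===== PRECONDITION & SPEC =====
def Spec_get_paths_lexicographic (block_size : List Int) (_gpt_compat : Bool) (out : List (List (Int × Int))) : Prop := out = get_paths_lexicographic_alt block_size _gpt_compat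
instance (block_size : List Int) (_gpt_compat : Bool) (out : List (List (Int × Int))) : Decidable (Spec_get_paths_lexicographic block_size _gpt_compat out) := by unfold Spec_get_paths_lexicographic; infer_instance

-- ===== CLAIM (what is proved, stated in full; the proofs are below) =====
def Claim_equal_get_paths_lexicographic : Prop := ∀ (block_size : List Int) (_gpt_compat : Bool), Dom_get_paths_lexicographic block_size _gpt_compat → Spec_get_paths_lexicographic block_size _gpt_compat (get_paths_lexicographic block_size _gpt_compat)

-- ===== LEMMAS AND PROOFS =====

theorem pvProdInt_cons (s : Int) (l : List Int) : pvProdInt (s :: l) = s * pvProdInt l := by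
  have h : ∀ (l : List Int) (a : Int), l.foldl (· * ·) a = a * l.foldl (· * ·) 1 := by
    intro l
    induction l with
    | nil => intro a; simp
    | cons x xs ih =>
        intro a
        simp only [List.foldl_cons]
        rw [ih (a * x), ih (1 * x)]
        ring
  simp only [pvProdInt, List.foldl_cons]
  rw [h l (1 * s), h l 1]
  ring

theorem pvProdInt_nonneg (l : List Int) (h : ∀ x ∈ l, 0 ≤ x) : 0 ≤ pvProdInt l := by
  induction l with
  | nil => simp [pvProdInt]
  | cons x xs ih =>
      rw [pvProdInt_cons]
      exact mul_nonneg (h x (by simp)) (ih (fun y hy => h y (by simp [hy])))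

theorem pv_flatMap_congr {α β : Type} {l : List α} {f g : α → List β}
    (h : ∀ a ∈ l, f a = g a) : l.flatMap f = l.flatMap g := by
  induction l with
  | nil => simp
  | cons x xs ih =>
      simp only [List.flatMap_cons]
      rw [h x (by simp), ih (fun a ha => h a (by simp [ha]))]

theorem pv_foldl_append {α : Type} (l : List (List α)) (a : List α) :
    l.foldl (· ++ ·) a = a ++ l.flatten := by
  induction l generalizing a with
  | nil => simp
  | cons x xs ih => simp [List.foldl_cons, ih]

theorem pv_range_mul_flatMap (a b : Nat) :
    List.range (a * b) = (List.range a).flatMap (fun x => (List.range b).map (fun r => x * b + r)) := by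
  induction a with
  | zero => simp
  | succ n ih =>
      rw [Nat.succ_mul, List.range_add, List.range_succ, ih]
      simp [List.flatMap_append, List.map_map, Function.comp]

theorem pv_pyRange_mul (s T : Int) (hs : 0 ≤ s) (hT : 0 ≤ T) :
    PySem.List.pyRange 0 (s * T) 1
      = (PySem.List.pyRange 0 s 1).flatMap
          (fun x => (PySem.List.pyRange 0 T 1).map (fun r => x * T + r)) := by
  rw [PySem.List.pyRange_one 0 (s * T), PySem.List.pyRange_one 0 s, PySem.List.pyRange_one 0 T]
  have hmul : (s * T - 0).toNat = (s - 0).toNat * (T - 0).toNat := by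
    simp only [sub_zero]
    rw [← Int.toNat_mul hs hT]
  rw [hmul, pv_range_mul_flatMap]
  simp only [List.flatMap_map, List.map_flatMap, List.map_map, Function.comp]
  apply pv_flatMap_congr
  intro x _
  apply List.map_congr_left
  intro r hr
  simp only [Function.comp_apply]
  have hTT : (((T - 0).toNat : Int)) = T := by omega
  push_cast
  rw [hTT]
  ring

theorem pv_flatten_flatMap {α β : Type} (l : List α) (f : α → List (List β)) :
    (l.flatMap f).flatten = l.flatMap (fun x => (f x).flatten) := by
  induction l with
  | nil => rfl
  | cons x xs ih => simp [List.flatMap_cons, List.flatten_append, ih]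

theorem pv_decode_step (s T r x : Int) (rest : List Int)
    (hT : pvProdInt rest = T) (hr0 : 0 ≤ r) (hrT : r < T) :
    pvDecode (x * T + r) (s :: rest) = x :: pvDecode r rest := by
  have hTpos : 0 < T := lt_of_le_of_lt hr0 hrT
  have hdiv : PySem.Int.floordiv (x * T + r) T = x := by
    rw [PySem.Int.floordiv_eq_iff_of_pos hTpos]
    constructor <;> nlinarith
  have hmod : PySem.Int.mod (x * T + r) T = r := by
    have := PySem.Int.floordiv_mul_add_mod (x * T + r) T
    rw [hdiv] at this
    linarith
  simp only [pvDecode, hT, hdiv, hmod]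

-- map-decode over the linear range = itertools.product of the per-axis ranges
theorem pv_decode_range (sizes : List Int) (h : ∀ x ∈ sizes, 0 ≤ x) :
    (PySem.List.pyRange 0 (pvProdInt sizes) 1).map (fun i => pvDecode i sizes)
      = pvProdA (sizes.map (fun s => PySem.List.pyRange 0 s 1)) := by
  induction sizes with
  | nil =>
      simp [pvProdInt, pvProdA, PySem.List.pyRange_one]
      rfl
  | cons s rest ih =>
      have hs : 0 ≤ s := h s (by simp)
      have hrest : ∀ x ∈ rest, 0 ≤ x := fun y hy => h y (by simp [hy])
      have hT : 0 ≤ pvProdInt rest := pvProdInt_nonneg rest hrest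
      rw [pvProdInt_cons, pv_pyRange_mul s (pvProdInt rest) hs hT]
      simp only [List.map_flatMap, List.map_map, Function.comp]
      simp only [pvProdA, List.map_cons]
      apply pv_flatMap_congr
      intro x _
      rw [← ih hrest]
      rw [List.map_map]
      apply List.map_congr_left
      intro r hr
      have hmem := (PySem.List.mem_pyRange_one).mp hr
      exact pv_decode_step s (pvProdInt rest) r x rest rfl hmem.1 hmem.2

theorem pv_map_const_flatten {α : Type} (l : List Int) (c : α) :
    (l.map (fun _ => [c])).flatten = List.replicate l.length c := by
  induction l with
  | nil => simp
  | cons x xs ih => simp [ih, List.replicate_succ]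

-- A's per-position path equals B's per-digits path
theorem pv_path_eq (pos : List Int) :
    pvPathA pos
      = (PySem.List.enumerate pos).flatMap (fun p => List.replicate p.2.toNat (p.1, (-1 : Int))) := by
  unfold pvPathA
  rw [pv_foldl_append]
  simp only [List.nil_append]
  rw [pv_flatten_flatMap]
  apply pv_flatMap_congr
  intro p _
  rw [pv_map_const_flatten (PySem.List.pyRange 0 p.2 1) (p.1, (-1 : Int))]
  rw [PySem.List.length_pyRange_one]
  simp

-- ===== VERDICT (by name: the statement is the Claim_ definition above) =====
theorem get_paths_lexicographic_spec : Claim_equal_get_paths_lexicographic := by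
  intro block_size _gpt_compat _
  unfold Spec_get_paths_lexicographic
  unfold get_paths_lexicographic get_paths_lexicographic_alt
  have hclamp : block_size.map (fun bs => PySem.List.pyRange 0 bs 1)
      = (block_size.map (fun bs => if bs > 0 then bs else 0)).map (fun s => PySem.List.pyRange 0 s 1) := by
    rw [List.map_map]
    apply List.map_congr_left
    intro b _
    by_cases hb : b > 0
    · simp [hb]
    · simp only [Function.comp, hb, if_neg]
      rw [PySem.List.pyRange_one_eq_nil (by omega), PySem.List.pyRange_one_eq_nil (by omega)]
  have hnn : ∀ x ∈ block_size.map (fun bs => if bs > 0 then bs else 0), 0 ≤ x := by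
    intro x hx
    rcases List.mem_map.mp hx with ⟨b, _, rfl⟩
    split_ifs with hb <;> omega
  rw [hclamp, ← pv_decode_range _ hnn]
  cases _gpt_compat with
  | false => simp [List.map_map, Function.comp, pv_path_eq]
  | true => simp [List.map_map, Function.comp, pv_path_eq]
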